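-- pv_equiv track=rewrite | github.com/njbsb/project-2 | executable_gui_scripts/TMDashboard/module_splanner.py | split_eachline
-- ===== SOURCE A (Python) =====
-- import math
--
-- def splitBelow9Rows(column):
--     columnlength = len(column)
--     breakindex = math.ceil(columnlength/2)
--
--     partition_a = column[:breakindex]
--     partition_b = column[breakindex:]
--
--     returnlist = [partition_a, partition_b]
--     return returnlist
--
-- def splitBelow15Rows(column):
--     columnlength = len(column)
--     breakindex = math.ceil(columnlength/3)
--
--     partition_a = column[:breakindex]
--     partition_aleft = column[breakindex:]
--
--     returnlist = [partition_a]
--     aleft_list = splitBelow9Rows(partition_aleft)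
--     returnlist.extend(aleft_list)
--     return returnlist
--
-- def splitBelow20Rows(column):
--     columnlength = len(column)
--     breakindex = math.ceil(columnlength/4)
--
--     partition_a = column[:breakindex]
--     partition_aleft = column[breakindex:]
--
--     returnlist = [partition_a]
--     aleft_list = splitBelow15Rows(partition_aleft)
--
--     returnlist.extend(aleft_list)
--     return returnlist
--
-- def split_eachline(columnlist):
--     for i, eachcolumn in enumerate(columnlist):
--         linelen = len(eachcolumn)
--         if linelen > 5:
--             if linelen <= 9:
--                 columnlist[i] = splitBelow9Rows(eachcolumn)
--             elif linelen <= 15: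
--                 columnlist[i] = splitBelow15Rows(eachcolumn)
--             elif linelen <= 20:
--                 columnlist[i] = splitBelow20Rows(eachcolumn)
--         else:
--             columnlist[i] = [eachcolumn]
--     return columnlist
-- ===== SOURCE B (Python) =====
-- def split_eachline(columnlist):
--     for i, column in enumerate(columnlist):
--         n = len(column)
--         if n <= 5:
--             columnlist[i] = [column]
--         elif n <= 20:
--             k = 2 if n <= 9 else 3 if n <= 15 else 4
--             parts, start, rem = [], 0, n
--             for d in range(k, 1, -1):
--                 step = -(-rem // d)
--                 parts.append(column[start:start + step])
--                 start += step
--                 rem -= step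
--             parts.append(column[start:])
--             columnlist[i] = parts
--     return columnlist
-- ===== Notes on version B (the rewrite author's own statement) =====
-- stated objective: simpler
-- what changed: Replaces the three mutually-recursive helper functions with one inline descending-denominator loop that slices off ceil(rem/d) elements for d = k..2 and appends the remainder.
import Mathlib
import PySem

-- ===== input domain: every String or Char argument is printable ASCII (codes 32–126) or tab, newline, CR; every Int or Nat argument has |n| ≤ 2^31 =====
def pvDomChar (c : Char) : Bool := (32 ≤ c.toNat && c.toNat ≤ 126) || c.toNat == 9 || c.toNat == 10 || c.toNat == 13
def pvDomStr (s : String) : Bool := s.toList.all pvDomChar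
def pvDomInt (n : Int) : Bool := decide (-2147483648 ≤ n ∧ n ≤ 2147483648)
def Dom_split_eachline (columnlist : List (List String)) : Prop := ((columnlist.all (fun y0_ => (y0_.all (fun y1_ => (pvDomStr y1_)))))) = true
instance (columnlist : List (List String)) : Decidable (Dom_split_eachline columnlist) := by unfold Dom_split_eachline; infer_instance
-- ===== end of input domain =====

-- B inlines A's three mutually-recursive split helpers into one descending-denominator loop (objective: simpler).
-- Both Pythons mutate columnlist in place and return the same object; the equivalence proved here is about the return value.


-- ===== PORT A =====
-- math.ceil(len/k) is ported as Nat ceiling division (len + k - 1) / k, exact since len ≥ 0;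
-- column[:b] / column[b:] with nonnegative b are ported as take/drop, exact for nonnegative indices.
def splitBelow9Rows (column : List String) : List (List String) :=
  let columnlength := column.length
  let breakindex := (columnlength + 1) / 2
  let partition_a := column.take breakindex
  let partition_b := column.drop breakindex
  [partition_a, partition_b]

def splitBelow15Rows (column : List String) : List (List String) :=
  let columnlength := column.length
  let breakindex := (columnlength + 2) / 3
  let partition_a := column.take breakindex
  let partition_aleft := column.drop breakindex
  partition_a :: splitBelow9Rows partition_aleft

def splitBelow20Rows (column : List String) : List (List String) :=
  let columnlength := column.length
  let breakindex := (columnlength + 3) / 4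
  let partition_a := column.take breakindex
  let partition_aleft := column.drop breakindex
  partition_a :: splitBelow15Rows partition_aleft

def split_eachline (columnlist : List (List String)) : List (List (List String)) :=
  columnlist.map (fun eachcolumn =>
    let linelen := eachcolumn.length
    if linelen > 5 then
      if linelen ≤ 9 then splitBelow9Rows eachcolumn
      else if linelen ≤ 15 then splitBelow15Rows eachcolumn
      else if linelen ≤ 20 then splitBelow20Rows eachcolumn
      else [eachcolumn]  -- Python leaves the element untouched here (a flat list, ill-typed under the convention); Pre_ excludes this
    else [eachcolumn])

-- ===== PORT B =====
-- the loop 'for d in range(k, 1, -1)' as a countdown recursion on d carrying (start, rem);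
-- step = -(-rem // d) = ceil(rem/d), ported as Nat ceiling division, exact since rem ≥ 0;
-- column[start:start+step] with nonnegative in-range indices ported as (drop start).take step.
def bParts (column : List String) : Nat → Nat → Nat → List (List String)
  | 0, start, _ => [column.drop start]
  | 1, start, _ => [column.drop start]
  | (d+2), start, rem =>
      let step := (rem + (d + 1)) / (d + 2)
      ((column.drop start).take step) :: bParts column (d+1) (start + step) (rem - step)

def split_eachline_alt (columnlist : List (List String)) : List (List (List String)) :=
  columnlist.map (fun column =>
    let n := column.length
    if n ≤ 5 then [column]
    else if n ≤ 20 then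
      let k := if n ≤ 9 then 2 else if n ≤ 15 then 3 else 4
      bParts column k 0 n
    else [column])  -- Python leaves the element untouched here (ill-typed under the convention); Pre_ excludes this

-- ===== PRECONDITION & SPEC =====
-- Pre_ excludes columns longer than 20: both Pythons leave such a column untouched, a flat list of
-- strings, which is not a value of the declared list[list[str]] element type and cannot be ported.
def Pre_split_eachline (columnlist : List (List String)) : Prop :=
  ∀ c ∈ columnlist, c.length ≤ 20
instance (columnlist : List (List String)) : Decidable (Pre_split_eachline columnlist) := by unfold Pre_split_eachline; infer_instance
def pvWitness_split_eachline : List (List String) :=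
  [["a","b","c","d","e","f","g"], ["x"], ["p","q","r","s","t","u","v","w","x","y","z"]]

def Spec_split_eachline (columnlist : List (List String)) (out : List (List (List String))) : Prop := out = split_eachline_alt columnlist
instance (columnlist : List (List String)) (out : List (List (List String))) : Decidable (Spec_split_eachline columnlist out) := by unfold Spec_split_eachline; infer_instance

-- ===== CLAIM (what is proved, stated in full; the proofs are below) =====
def Claim_equal_split_eachline : Prop := ∀ (columnlist : List (List String)), Dom_split_eachline columnlist → Pre_split_eachline columnlist → Spec_split_eachline columnlist (split_eachline columnlist)

-- ===== LEMMAS AND PROOFS =====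

lemma bParts_two (c : List String) (s r : Nat) :
    bParts c 2 s r = [(c.drop s).take ((r + 1) / 2), c.drop (s + (r + 1) / 2)] := by
  simp [bParts]

lemma bParts_nine (c : List String) :
    splitBelow9Rows c = bParts c 2 0 c.length := by
  simp [splitBelow9Rows, bParts_two]

lemma bParts_fifteen (c : List String) :
    splitBelow15Rows c = bParts c 3 0 c.length := by
  simp [splitBelow15Rows, splitBelow9Rows, bParts, List.drop_drop]

lemma bParts_twenty (c : List String) :
    splitBelow20Rows c = bParts c 4 0 c.length := by
  simp [splitBelow20Rows, splitBelow15Rows, splitBelow9Rows, bParts, List.drop_drop]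
  omega

-- ===== VERDICT (by name: the statement is the Claim_ definition above) =====
theorem split_eachline_spec : Claim_equal_split_eachline := by
  intro columnlist _ hpre
  unfold Spec_split_eachline split_eachline split_eachline_alt
  apply List.map_congr_left
  intro c hc
  have hlen := hpre c hc
  by_cases h5 : c.length ≤ 5
  · simp [h5, Nat.not_lt.mpr h5]
  · have h5' : 5 < c.length := Nat.lt_of_not_le h5
    by_cases h9 : c.length ≤ 9
    · simp [h5', h5, h9, hlen, bParts_nine]
    · by_cases h15 : c.length ≤ 15
      · simp [h5', h5, h9, h15, hlen, bParts_fifteen]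
      · simp [h5', h5, h9, h15, hlen, bParts_twenty]
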